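-- pv_equiv track=rewrite | github.com/CryptoSolvers/CryptoSolve | moe/enum_str.py | _get_lists_for_map
-- ===== SOURCE A (Python) =====
-- def _get_lists_for_map(l):
-- 	oldLen = len(l)
-- 	newLen = int((oldLen * (oldLen + 1))/2)
-- 	s1 = []
-- 	s2 = []
-- 	index1 = 0
-- 	index2 = 0
-- 	#create two lists to match each element with every other element with no duplicate pairs
-- 	#for example if l = ["a", "b", "c"] then
-- 	#s1 = ["a", "b", "c", "a", "b", "c"]
-- 	#s2 = ["a", "b", "c", "b", "c", "a"]
-- 	#each character is matched with each other character exactly one time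
-- 	#this makes the map function work properly as far as I can tell
-- 	for x in range(newLen):
-- 		s1.append(l[index1])
-- 		s2.append(l[index2])
-- 		index1 += 1
-- 		index2 += 1
-- 		if(index1 >= oldLen):
-- 			index1 -= oldLen
-- 			index2 += 1
-- 		if(index2 >= oldLen):
-- 			index2 -= oldLen
-- 	return (s1, s2)
-- ===== SOURCE B (Python) =====
-- def _get_lists_for_map(l):
--     # Closed-form bulk construction: s1 is l tiled; s2 is the concatenation of
--     # the cyclic rotations of l (rotation d pairs l[i] with l[(i+d)%n]);
--     # both are truncated to the n*(n+1)//2 pairs the pairing contains.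
--     n = len(l)
--     total = n * (n + 1) // 2
--     reps = n // 2 + 1
--     s1 = (l * reps)[:total]
--     s2 = []
--     for d in range(reps):
--         s2 += l[d:] + l[:d]
--     return (s1, s2[:total])
-- ===== Notes on version B (the rewrite author's own statement) =====
-- stated objective: alternative
-- what changed: Replaced A's element-by-element loop over two hand-maintained wrap-around index registers by a bulk closed-form construction: s1 is l tiled by list repetition, s2 is the concatenation of the cyclic rotations l[d:]+l[:d], both sliced down to n*(n+1)//2 entries.
import Mathlib
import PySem

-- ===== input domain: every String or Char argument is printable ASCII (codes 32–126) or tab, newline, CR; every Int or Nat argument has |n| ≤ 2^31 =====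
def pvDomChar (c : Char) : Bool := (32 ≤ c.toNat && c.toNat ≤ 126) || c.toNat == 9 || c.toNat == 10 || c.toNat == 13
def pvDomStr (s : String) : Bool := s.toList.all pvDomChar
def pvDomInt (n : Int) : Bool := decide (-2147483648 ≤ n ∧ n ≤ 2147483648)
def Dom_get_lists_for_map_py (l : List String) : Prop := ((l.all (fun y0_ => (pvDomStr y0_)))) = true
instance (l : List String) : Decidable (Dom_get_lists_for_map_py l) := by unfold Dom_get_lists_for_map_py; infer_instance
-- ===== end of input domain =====

-- B builds both lists by whole-list operations — s1 by tiling l, s2 by concatenating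
-- the cyclic rotations of l, both truncated to n*(n+1)//2 — instead of A's
-- element-by-element loop over two wrap-around index registers; objective: alternative, same cost.

-- ===== PORT A =====
-- loop body of A's `for x in range(newLen)` (state: s1, s2, index1, index2)
def aStep (l : List String) (oldLen : Int) (st : List String × List String × Int × Int) :
    List String × List String × Int × Int :=
  match st with
  | (s1, s2, index1, index2) =>
    let s1 := s1 ++ [PySem.List.pyGetD l index1 ""]       -- l[index1]: always in range here
    let s2 := s2 ++ [PySem.List.pyGetD l index2 ""]
    let index1 := index1 + 1
    let index2 := index2 + 1
    let p := if index1 ≥ oldLen then (index1 - oldLen, index2 + 1) else (index1, index2)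
    let index2' := if p.2 ≥ oldLen then p.2 - oldLen else p.2
    (s1, s2, p.1, index2')

def get_lists_for_map_py (l : List String) : List String × List String :=
  let oldLen : Int := l.length
  -- int((oldLen*(oldLen+1))/2): the product is even and nonnegative, so this is exact integer halving
  let newLen : Int := PySem.Int.floordiv (oldLen * (oldLen + 1)) 2
  let res := (PySem.List.pyRange 0 newLen 1).foldl (fun st _ => aStep l oldLen st) ([], [], 0, 0)
  (res.1, res.2.1)

-- ===== PORT B =====
-- `l * reps` is List.flatten (List.replicate reps l); the slices `xs[:k]` (k ≥ 0),
-- `l[d:]`, `l[:d]` (0 ≤ d) are exactly List.take k, List.drop d, List.take d.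
def get_lists_for_map_py_alt (l : List String) : List String × List String :=
  let n := l.length
  let total := n * (n + 1) / 2
  let reps := n / 2 + 1
  let s1 := (List.flatten (List.replicate reps l)).take total
  let s2 := (List.range reps).foldl (fun s2 d => s2 ++ (l.drop d ++ l.take d)) []
  (s1, s2.take total)

-- ===== PRECONDITION & SPEC =====
def Spec_get_lists_for_map_py (l : List String) (out : List String × List String) : Prop := out = get_lists_for_map_py_alt l
instance (l : List String) (out : List String × List String) : Decidable (Spec_get_lists_for_map_py l out) := by unfold Spec_get_lists_for_map_py; infer_instance

-- ===== CLAIM (what is proved, stated in full; the proofs are below) =====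
def Claim_equal_get_lists_for_map_py : Prop := ∀ (l : List String), Dom_get_lists_for_map_py l → Spec_get_lists_for_map_py l (get_lists_for_map_py l)

-- ===== LEMMAS AND PROOFS =====

-- the pair emitted at flat position x is (l[x % n], l[(x % n + x / n) % n])
def seq1 (l : List String) (k : Nat) : List String :=
  (List.range k).map (fun x => l.getD (x % l.length) "")
def seq2 (l : List String) (k : Nat) : List String :=
  (List.range k).map (fun x => l.getD ((x % l.length + x / l.length) % l.length) "")

theorem foldl_const_iterate {α β : Type} (xs : List α) (g : β → β) (s : β) :
    xs.foldl (fun st _ => g st) s = g^[xs.length] s := by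
  induction xs generalizing s with
  | nil => rfl
  | cons x xs ih => simp [List.foldl, ih, Function.iterate_succ_apply]

theorem div_lt_of_lt_half (n k : Nat) (h : k < n * (n + 1) / 2) : k / n < n := by
  have hn : 0 < n := by rcases n with _ | m <;> omega
  have h2 : n * (n + 1) ≤ 2 * (n * n) := by nlinarith
  have h3 : n * (n + 1) / 2 ≤ 2 * (n * n) / 2 := Nat.div_le_div_right h2
  have h4 : 2 * (n * n) / 2 = n * n := Nat.mul_div_cancel_left _ (by norm_num)
  exact (Nat.div_lt_iff_lt_mul hn).mpr (by omega)

theorem a_iter (l : List String) (k : Nat) (hk : k ≤ l.length * (l.length + 1) / 2) :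
    ∃ j1 j2 : Int,
      (aStep l (l.length : Int))^[k] ([], [], 0, 0) = (seq1 l k, seq2 l k, j1, j2) ∧
      (k < l.length * (l.length + 1) / 2 →
        j1 = ((k % l.length : Nat) : Int) ∧
        j2 = (((k % l.length + k / l.length) % l.length : Nat) : Int)) := by
  set n := l.length with hn
  induction k with
  | zero =>
    exact ⟨0, 0, by simp [seq1, seq2], fun _ => by simp⟩
  | succ k ih =>
    have hklt : k < n * (n + 1) / 2 := by omega
    obtain ⟨j1, j2, hst, hidx⟩ := ih (by omega)
    obtain ⟨h1, h2⟩ := hidx hklt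
    have hn0 : 0 < n := by
      rcases hv : n with _ | m
      · rw [hv] at hklt; simp at hklt
      · omega
    set i := k % n with hi
    set d := k / n with hd
    have hil : i < n := Nat.mod_lt _ hn0
    have hdl : d < n := div_lt_of_lt_half n k hklt
    have hkdm : n * d + i = k := Nat.div_add_mod k n
    -- the two appended elements extend the spec sequences
    have hs1 : seq1 l k ++ [l.getD i ""] = seq1 l (k + 1) := by
      simp only [seq1, List.range_succ, List.map_append, List.map_cons, List.map_nil]
      rfl
    have hs2 : seq2 l k ++ [l.getD ((i + d) % n) ""] = seq2 l (k + 1) := by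
      simp only [seq2, List.range_succ, List.map_append, List.map_cons, List.map_nil]
      rfl
    rw [Function.iterate_succ_apply', hst]
    simp only [aStep, h1, h2, PySem.List.pyGetD_natCast]
    by_cases hw : i + 1 = n
    · -- index1 wraps: step k+1 starts diagonal d+1
      have hcond : ((i : Int) + 1 ≥ (n : Int)) := by omega
      have hk1 : k + 1 = n * (d + 1) := by
        have : n * (d + 1) = n * d + n := by ring
        omega
      rw [if_pos hcond]
      refine ⟨_, _, by rw [hs1, hs2], fun hk1lt => ?_⟩
      have hd1 : (k + 1) / n < n := div_lt_of_lt_half n (k + 1) hk1lt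
      have hdiv : (k + 1) / n = d + 1 := by
        rw [hk1, Nat.mul_div_cancel_left _ hn0]
      have hmod : (k + 1) % n = 0 := by
        rw [hk1]; exact Nat.mul_mod_right n (d + 1)
      rw [hdiv] at hd1
      rw [hmod, hdiv]
      have htgt : (0 + (d + 1)) % n = d + 1 := by
        rw [Nat.zero_add]; exact Nat.mod_eq_of_lt hd1
      rw [htgt]
      rcases Nat.eq_zero_or_pos d with hd0 | hdpos
      · -- d = 0: index2 was n-1, bumped twice past n, wraps to 1
        have hjval : (i + d) % n = n - 1 := by
          have hv : i + d = n - 1 := by omega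
          rw [hv]; exact Nat.mod_eq_of_lt (by omega)
        rw [hjval]
        constructor
        · omega
        · split_ifs with hc <;> omega
      · -- d ≥ 1: index2 was d-1, bumped twice to d+1 < n, no wrap
        have hjval : (i + d) % n = d - 1 := by
          have hv : i + d = n + (d - 1) := by omega
          rw [hv, Nat.add_mod_left]
          exact Nat.mod_eq_of_lt (by omega)
        rw [hjval]
        constructor
        · omega
        · split_ifs with hc <;> omega
    · -- no wrap: same diagonal d, position i+1
      have hcond : ¬ ((i : Int) + 1 ≥ (n : Int)) := by omega
      have hmod : (k + 1) % n = i + 1 := by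
        conv_lhs => rw [← hkdm]
        have hv : n * d + i + 1 = n * d + (i + 1) := by omega
        rw [hv, Nat.mul_add_mod]
        exact Nat.mod_eq_of_lt (by omega)
      have hdiv : (k + 1) / n = d := by
        conv_lhs => rw [← hkdm]
        have hv : n * d + i + 1 = n * d + (i + 1) := by omega
        rw [hv, Nat.mul_add_div hn0]
        have : (i + 1) / n = 0 := Nat.div_eq_of_lt (by omega)
        omega
      have hn2 : 2 ≤ n := by omega
      have htgt : (i + 1 + d) % n = ((i + d) % n + 1) % n := by
        conv_lhs => rw [show i + 1 + d = (i + d) + 1 by omega]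
        rw [Nat.add_mod (i + d) 1 n, Nat.mod_eq_of_lt hn2]
      rw [if_neg hcond]
      refine ⟨_, _, by rw [hs1, hs2], fun _ => ?_⟩
      rw [hmod, hdiv, htgt]
      have hj2l : (i + d) % n < n := Nat.mod_lt _ hn0
      by_cases hfull : (i + d) % n + 1 = n
      · have hv : ((i + d) % n + 1) % n = 0 := by rw [hfull, Nat.mod_self]
        rw [hv]
        constructor
        · omega
        · split_ifs with hc <;> omega
      · have hv : ((i + d) % n + 1) % n = (i + d) % n + 1 := Nat.mod_eq_of_lt (by omega)
        rw [hv]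
        constructor
        · omega
        · split_ifs with hc <;> omega

-- (range n).map (getD l) re-assembles l
theorem map_getD_range (l : List String) :
    (List.range l.length).map (fun i => l.getD i "") = l := by
  apply List.ext_getElem
  · simp
  · intro i h1 h2
    simp [List.getD_eq_getElem?_getD, h2]

-- l tiled r times, by flat position
theorem tile_eq (l : List String) (r : Nat) :
    List.flatten (List.replicate r l) =
      (List.range (r * l.length)).map (fun x => l.getD (x % l.length) "") := by
  induction r with
  | zero => simp
  | succ r ih =>
    rw [List.replicate_succ, List.flatten_cons, ih,
      show (r + 1) * l.length = l.length + r * l.length by ring,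
      List.range_add, List.map_append]
    congr 1
    · have hcg : (List.range l.length).map (fun x => l.getD (x % l.length) "")
          = (List.range l.length).map (fun i => l.getD i "") := by
        apply List.map_congr_left
        intro x hx
        rw [List.mem_range] at hx
        rw [Nat.mod_eq_of_lt hx]
      rw [hcg, map_getD_range]
    · rw [List.map_map]
      apply List.map_congr_left
      intro x hx
      simp [Function.comp, Nat.add_mod_left]

-- the rotation l[d:] + l[:d] by position (d ≤ n)
theorem rot_eq (l : List String) (d : Nat) (hd : d ≤ l.length) :
    l.drop d ++ l.take d =
      (List.range l.length).map (fun i => l.getD ((i + d) % l.length) "") := by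
  apply List.ext_getElem
  · simp; omega
  · intro i h1 h2
    simp only [List.length_append, List.length_drop, List.length_take] at h1
    simp only [List.length_map, List.length_range] at h2
    rw [List.getElem_map, List.getElem_range]
    by_cases hc : i < l.length - d
    · rw [List.getElem_append_left (by simp; omega), List.getElem_drop]
      have hm : (i + d) % l.length = i + d := Nat.mod_eq_of_lt (by omega)
      rw [hm, List.getD_eq_getElem?_getD, List.getElem?_eq_getElem (by omega)]
      simp [Nat.add_comm d i]
    · rw [List.getElem_append_right (by simp; omega)]
      have hm : (i + d) % l.length = i + d - l.length := by
        conv_lhs => rw [show i + d = l.length + (i + d - l.length) by omega]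
        rw [Nat.add_mod_left, Nat.mod_eq_of_lt (by omega)]
      rw [List.getElem_take, hm, List.getD_eq_getElem?_getD,
        List.getElem?_eq_getElem (by omega)]
      simp only [Option.getD_some]
      congr 1
      simp only [List.length_drop]
      omega

-- concatenating the first r rotations, by flat position (r ≤ n + 1)
theorem rots_eq (l : List String) (r : Nat) (hr : r ≤ l.length + 1) :
    (List.range r).foldl (fun s2 d => s2 ++ (l.drop d ++ l.take d)) [] =
      (List.range (r * l.length)).map
        (fun x => l.getD ((x % l.length + x / l.length) % l.length) "") := by
  induction r with
  | zero => simp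
  | succ r ih =>
    rcases Nat.eq_zero_or_pos l.length with h0 | hn0
    · -- n = 0: every rotation is [] and both sides are []
      have hl : l = [] := List.eq_nil_of_length_eq_zero h0
      subst hl
      simp only [List.length_nil, Nat.mul_zero, List.range_zero, List.map_nil,
        List.drop_nil, List.take_nil, List.append_nil]
      clear ih hr
      induction r with
      | zero => simp
      | succ r ih2 =>
        rw [List.range_succ, List.foldl_append, ih2]
        simp
    · rw [List.range_succ, List.foldl_append, ih (by omega)]
      simp only [List.foldl_cons, List.foldl_nil]
      rw [show (r + 1) * l.length = r * l.length + l.length by ring,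
        List.range_add, List.map_append]
      congr 1
      rw [rot_eq l r (by omega), List.map_map]
      apply List.map_congr_left
      intro i hi
      rw [List.mem_range] at hi
      have hmod : (r * l.length + i) % l.length = i := by
        rw [show r * l.length + i = l.length * r + i by ring, Nat.mul_add_mod,
          Nat.mod_eq_of_lt hi]
      have hdiv : (r * l.length + i) / l.length = r := by
        rw [show r * l.length + i = l.length * r + i by ring, Nat.mul_add_div hn0,
          Nat.div_eq_of_lt hi]
        omega
      simp only [Function.comp, hmod, hdiv]

theorem total_le (n : Nat) : n * (n + 1) / 2 ≤ (n / 2 + 1) * n := by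
  have hdvd : 2 ∣ n * (n + 1) := (Nat.even_mul_succ_self n).two_dvd
  have h2 : n * (n + 1) / 2 * 2 = n * (n + 1) := Nat.div_mul_cancel hdvd
  have hm := Nat.div_add_mod n 2
  nlinarith [Nat.mod_lt n (show 0 < 2 by norm_num)]

-- ===== VERDICT (by name: the statement is the Claim_ definition above) =====
theorem get_lists_for_map_py_spec : Claim_equal_get_lists_for_map_py := by
  intro l _
  simp only [Spec_get_lists_for_map_py, get_lists_for_map_py, get_lists_for_map_py_alt]
  set n := l.length with hn
  set total := n * (n + 1) / 2 with htot
  set reps := n / 2 + 1 with hreps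
  have hle : total ≤ reps * n := by
    calc total ≤ (n / 2 + 1) * n := total_le n
    _ = reps * n := by rw [hreps]
  -- A's side evaluates to (seq1 total, seq2 total)
  have hflo : PySem.Int.floordiv ((n : Int) * ((n : Int) + 1)) 2
      = ((total : Nat) : Int) := by
    rw [PySem.Int.floordiv_eq_ediv_of_pos (by norm_num)]
    push_cast [htot]
    ring_nf
  have hlen : (PySem.List.pyRange 0 ((total : Nat) : Int) 1).length = total := by
    rw [PySem.List.length_pyRange_one, Int.sub_zero, Int.toNat_natCast]
  obtain ⟨j1, j2, hst, -⟩ := a_iter l total (le_refl _)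
  rw [hflo, foldl_const_iterate _ (aStep l (n : Int)), hlen, hst]
  -- B's side evaluates to the same
  have hb1 : (List.flatten (List.replicate reps l)).take total = seq1 l total := by
    rw [tile_eq, ← List.map_take, List.take_range, Nat.min_eq_left hle, seq1]
  have hb2 : ((List.range reps).foldl (fun s2 d => s2 ++ (l.drop d ++ l.take d)) []).take total
      = seq2 l total := by
    rw [rots_eq l reps (by omega), ← List.map_take, List.take_range,
      Nat.min_eq_left hle, seq2]
  rw [hb1, hb2]
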